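-- pv_equiv track=rewrite | github.com/LucasjsSilva/Smith-Walterman | SW.py | EncontraMaioreCaminhos
-- ===== SOURCE A (Python) =====
-- def EncontraMaioreCaminhos(setas):
--     maior = -1000
--     caminho = []
--     for tupla in setas:
--         if tupla[0] >= maior:
--             maior = tupla[0]
--     for tupla in setas:
--         if tupla[0] == maior:
--             caminho.append(tupla[1])
--
--     return maior, caminho
-- ===== SOURCE B (Python) =====
-- def EncontraMaioreCaminhos(setas):
--     maior = -1000
--     caminho = []
--     for tupla in setas:
--         if tupla[0] > maior:
--             maior = tupla[0]
--             caminho = [tupla[1]]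
--         elif tupla[0] == maior:
--             caminho.append(tupla[1])
--     return maior, caminho
-- ===== Notes on version B (the rewrite author's own statement) =====
-- stated objective: alternative
-- what changed: Fused A's two scans (find max, then collect) into one pass maintaining the running max and its matching list, resetting the list when a new strict max appears.
import Mathlib
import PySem

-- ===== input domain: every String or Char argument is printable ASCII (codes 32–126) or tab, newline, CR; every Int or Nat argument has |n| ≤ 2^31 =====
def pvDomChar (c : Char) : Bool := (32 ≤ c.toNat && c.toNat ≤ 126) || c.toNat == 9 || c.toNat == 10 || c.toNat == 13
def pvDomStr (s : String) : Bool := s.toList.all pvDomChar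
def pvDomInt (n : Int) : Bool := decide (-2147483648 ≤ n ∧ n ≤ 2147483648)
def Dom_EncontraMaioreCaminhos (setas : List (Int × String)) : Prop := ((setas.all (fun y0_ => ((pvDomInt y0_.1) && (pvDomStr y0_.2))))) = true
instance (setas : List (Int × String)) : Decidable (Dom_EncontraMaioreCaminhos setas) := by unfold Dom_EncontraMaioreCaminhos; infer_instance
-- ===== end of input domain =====

-- B fuses A's two scans into one pass that maintains the running max and its matching list (reset on a new strict max); same result, different decomposition.

-- ===== PORT A =====
def EncontraMaioreCaminhos (setas : List (Int × String)) : Int × List String :=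
  let maior := setas.foldl (fun m t => if t.1 ≥ m then t.1 else m) (-1000)
  let caminho := setas.foldl (fun c t => if t.1 = maior then c ++ [t.2] else c) []
  (maior, caminho)

-- ===== PORT B =====
def EncontraMaioreCaminhos_alt (setas : List (Int × String)) : Int × List String :=
  setas.foldl (fun s t =>
    if t.1 > s.1 then (t.1, [t.2])
    else if t.1 = s.1 then (s.1, s.2 ++ [t.2])
    else s) (-1000, [])

-- ===== PRECONDITION & SPEC =====
def Spec_EncontraMaioreCaminhos (setas : List (Int × String)) (out : Int × List String) : Prop := out = EncontraMaioreCaminhos_alt setas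
instance (setas : List (Int × String)) (out : Int × List String) : Decidable (Spec_EncontraMaioreCaminhos setas out) := by unfold Spec_EncontraMaioreCaminhos; infer_instance

-- ===== CLAIM (what is proved, stated in full; the proofs are below) =====
def Claim_equal_EncontraMaioreCaminhos : Prop := ∀ (setas : List (Int × String)), Dom_EncontraMaioreCaminhos setas → Spec_EncontraMaioreCaminhos setas (EncontraMaioreCaminhos setas)

-- ===== LEMMAS AND PROOFS =====

def pvMax (m : Int) (l : List (Int × String)) : Int :=
  l.foldl (fun m t => if t.1 ≥ m then t.1 else m) m

def pvCollect (v : Int) : List (Int × String) → List String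
  | [] => []
  | t :: l => if t.1 = v then t.2 :: pvCollect v l else pvCollect v l

theorem pvMax_ge (l : List (Int × String)) : ∀ m : Int, m ≤ pvMax m l := by
  induction l with
  | nil => intro m; simp [pvMax]
  | cons t l ih =>
    intro m
    have h := ih (if t.1 ≥ m then t.1 else m)
    simp only [pvMax, List.foldl_cons] at *
    split_ifs at h ⊢ <;> omega

theorem foldl_collect (l : List (Int × String)) :
    ∀ (c : List String) (v : Int),
      l.foldl (fun c t => if t.1 = v then c ++ [t.2] else c) c = c ++ pvCollect v l := by
  induction l with
  | nil => intro c v; simp [pvCollect]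
  | cons t l ih =>
    intro c v
    simp only [List.foldl_cons, pvCollect]
    split_ifs with h <;> simp [ih]

theorem fold_alt (l : List (Int × String)) :
    ∀ (m : Int) (c : List String),
      l.foldl (fun s t =>
        if t.1 > s.1 then (t.1, [t.2])
        else if t.1 = s.1 then (s.1, s.2 ++ [t.2])
        else s) (m, c)
      = (pvMax m l, if pvMax m l = m then c ++ pvCollect m l else pvCollect (pvMax m l) l) := by
  induction l with
  | nil => intro m c; simp [pvMax, pvCollect]
  | cons t l ih =>
    obtain ⟨x, y⟩ := t
    intro m c
    simp only [List.foldl_cons]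
    by_cases h1 : x > m
    · have hM : pvMax m ((x, y) :: l) = pvMax x l := by
        simp [pvMax, show x ≥ m from le_of_lt h1]
      rw [if_pos h1, ih x [y], hM]
      have hge := pvMax_ge l x
      have hne : pvMax x l ≠ m := by omega
      rw [if_neg hne]
      by_cases h2 : pvMax x l = x
      · rw [if_pos h2, h2]; simp [pvCollect]
      · rw [if_neg h2]
        simp [pvCollect, show ¬ x = pvMax x l from fun h => h2 h.symm]
    · by_cases h2 : x = m
      · have hM : pvMax m ((x, y) :: l) = pvMax m l := by
          simp [pvMax, h2]
        rw [if_neg h1, if_pos h2, ih m (c ++ [y]), hM]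
        by_cases h3 : pvMax m l = m
        · rw [if_pos h3, if_pos h3]; simp [pvCollect, h2]
        · rw [if_neg h3, if_neg h3]
          simp [pvCollect, show ¬ x = pvMax m l from by rw [h2]; exact fun h => h3 h.symm]
      · have hlt : x < m := by omega
        have hM : pvMax m ((x, y) :: l) = pvMax m l := by
          simp [pvMax, show ¬ x ≥ m by omega]
        rw [if_neg h1, if_neg h2, ih m c, hM]
        by_cases h3 : pvMax m l = m
        · rw [if_pos h3, if_pos h3]; simp [pvCollect, h2]
        · rw [if_neg h3, if_neg h3]
          have := pvMax_ge l m
          simp [pvCollect, show ¬ x = pvMax m l by omega]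

-- ===== VERDICT (by name: the statement is the Claim_ definition above) =====
theorem EncontraMaioreCaminhos_spec : Claim_equal_EncontraMaioreCaminhos := by
  intro setas _
  show _ = _
  simp only [EncontraMaioreCaminhos, EncontraMaioreCaminhos_alt, fold_alt]
  rw [foldl_collect]
  show (pvMax (-1000) setas, [] ++ pvCollect (pvMax (-1000) setas) setas) = _
  by_cases h : pvMax (-1000) setas = -1000
  · simp [h]
  · simp [h]
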